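-- pv_equiv track=rewrite | github.com/golemfactory/ffmpeg-tools | ffmpeg_tools/commands.py | adjust_stream_indexes_for_removals
-- ===== SOURCE A (Python) =====
-- from typing import Any, Dict, List
--
-- def adjust_stream_indexes_for_removals(indexed_map: Dict[int, Any], removed_indexes: List[int]) -> Dict[int, Any]:
--     """
--     Accepts a dict representing streams that will not be removed
--     and updates their indexes to the values they will have when some other
--     streams get removed.
--     """
--
--     assert set(indexed_map) & set(removed_indexes) == set()
--     assert all(index >= 0 for index in set(indexed_map) | set(removed_indexes))
--
--     if len(indexed_map) == 0:
--         return {}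
--
--     # We'll iterate over two sorted collections in paralled.
--     # The first one is the set of streams to be removed.
--     # The other is a set of buckets corresponding to intervals between streams
--     # from index_map. Initially the buckets are empty. As we go over the
--     # removed streams, each one is added to the bucket for interval it falls into.
--     removal_histogram = {index: 0 for index in sorted(indexed_map)}
--     histogram_iterator = (index for index in removal_histogram)
--     current_histogram_index = next(histogram_iterator)
--
--     done = False
--     for removed_index in sorted(removed_indexes):
--         while current_histogram_index < removed_index:
--             try:
--                 current_histogram_index = next(histogram_iterator)
--             except StopIteration:
--                 done = True
--                 break
--
--         if done:
--             break
--
--         removal_histogram[current_histogram_index] += 1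
--
--     # Now we go over each stream in indexed_map and decrease its index by the total
--     # number of removed streams below it. We get that running total by summing
--     # the buckets as we go.
--     reindexed_map: Dict[int, Any] = {}
--     running_total = 0
--     for index, value in indexed_map.items():
--         running_total += removal_histogram[index]
--         assert running_total <= index
--         assert index - running_total not in reindexed_map
--
--         reindexed_map[index - running_total] = value
--
--     return reindexed_map
-- ===== SOURCE B (Python) =====
-- from bisect import bisect_left
-- from typing import Any, Dict, List
--
--
-- def adjust_stream_indexes_for_removals(indexed_map: Dict[int, Any], removed_indexes: List[int]) -> Dict[int, Any]:
--     assert set(indexed_map) & set(removed_indexes) == set()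
--     assert all(index >= 0 for index in set(indexed_map) | set(removed_indexes))
--
--     removed_sorted = sorted(removed_indexes)
--     return {index - bisect_left(removed_sorted, index): value
--             for index, value in indexed_map.items()}
-- ===== Notes on version B (the rewrite author's own statement) =====
-- stated objective: simpler
-- what changed: Replaces the sorted-histogram/bucket merge and running-total pass by a one-shot per-key count: sort removed_indexes once and look up the number of removed indexes below each key with bisect_left; …
-- outside the precondition, e.g. on adjust_stream_indexes_for_removals({2: 'a', 1: 'b'}, [0]): A returns {2: 'a', 0: 'b'}, B returns {1: 'a', 0: 'b'}
import Mathlib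
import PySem

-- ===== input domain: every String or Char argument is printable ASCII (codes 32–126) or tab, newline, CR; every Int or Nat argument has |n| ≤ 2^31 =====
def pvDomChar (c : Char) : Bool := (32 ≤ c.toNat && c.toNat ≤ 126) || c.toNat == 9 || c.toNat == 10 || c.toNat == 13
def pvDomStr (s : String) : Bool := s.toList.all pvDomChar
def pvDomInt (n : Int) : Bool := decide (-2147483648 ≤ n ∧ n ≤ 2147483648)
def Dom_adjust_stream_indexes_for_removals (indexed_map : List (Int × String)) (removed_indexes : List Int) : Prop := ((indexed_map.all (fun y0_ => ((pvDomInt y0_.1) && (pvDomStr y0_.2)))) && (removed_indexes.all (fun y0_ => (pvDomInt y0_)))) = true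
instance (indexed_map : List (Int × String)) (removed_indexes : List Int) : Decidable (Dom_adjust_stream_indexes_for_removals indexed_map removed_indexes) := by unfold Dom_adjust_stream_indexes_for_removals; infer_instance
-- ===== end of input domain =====

-- B replaces A's sorted-histogram / running-total merge by a one-shot per-key count of removed
-- indexes below each key (bisect_left on a once-sorted copy): simpler, same result on Pre_.


-- ===== PORT A =====
-- the `while current_histogram_index < removed_index: current… = next(histogram_iterator)` walk,
-- with the iterator position kept as an index p into the sorted key list
def pvAdvance (S : List Int) (r : Int) (p : Nat) : Nat :=
  if h : p < S.length then
    if S[p] < r then pvAdvance S r (p + 1) else p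
  else p
termination_by S.length - p

-- one step of the `for removed_index in sorted(removed_indexes)` loop; state = (histogram, iterator position, done)
def pvFillStep (S : List Int) (st : PySem.Dict Int Int × Nat × Bool) (r : Int) :
    PySem.Dict Int Int × Nat × Bool :=
  if st.2.2 then st
  else
    let p' := pvAdvance S r st.2.1
    if h : p' < S.length then (st.1.modify S[p'] 0 (· + 1), p', false)
    else (st.1, p', true)

-- the two top-level asserts only raise; the inputs on which they fail are excluded by Pre_,
-- as are the inputs on which the two asserts inside the final loop fail
def adjust_stream_indexes_for_removals (indexed_map : List (Int × String)) (removed_indexes : List Int) : List (Int × String) :=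
  let d : PySem.Dict Int String := PySem.Dict.ofList indexed_map
  if d.size = 0 then [] else
  let sortedKeys := PySem.List.sorted d.keys (fun k => k) false
  let hist0 : PySem.Dict Int Int := sortedKeys.foldl (fun h k => h.insert k 0) PySem.Dict.empty
  let hist := ((PySem.List.sorted removed_indexes (fun r => r) false).foldl
      (pvFillStep sortedKeys) (hist0, 0, false)).1
  (d.items.foldl
      (fun (acc : PySem.Dict Int String × Int) kv =>
        let rt := acc.2 + hist.getD kv.1 0
        (acc.1.insert (kv.1 - rt) kv.2, rt))
      (PySem.Dict.empty, 0)).1.items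

-- ===== PORT B =====
def adjust_stream_indexes_for_removals_alt (indexed_map : List (Int × String)) (removed_indexes : List Int) : List (Int × String) :=
  let d : PySem.Dict Int String := PySem.Dict.ofList indexed_map
  let removed_sorted := PySem.List.sorted removed_indexes (fun r => r) false
  (d.items.foldl
      (fun (acc : PySem.Dict Int String) kv =>
        acc.insert (kv.1 - (PySem.List.bisectLeft removed_sorted kv.1 : Int)) kv.2)
      PySem.Dict.empty).items

-- ===== PRECONDITION & SPEC =====
-- the keys of the Python dict, in insertion order
def pvKeys (indexed_map : List (Int × String)) : List Int := (PySem.Dict.ofList indexed_map).keys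
-- number of removed indexes strictly below k
def pvBelow (removed_indexes : List Int) (k : Int) : Int :=
  (removed_indexes.countP (fun r => decide (r < k)) : Int)
-- number of removed indexes that fall into key k's histogram bucket: r ≤ k with no key in [r, k)
def pvBucket (keys removed_indexes : List Int) (k : Int) : Int :=
  (removed_indexes.countP
    (fun r => decide (r ≤ k) && !(keys.any (fun k' => decide (r ≤ k') && decide (k' < k)))) : Int)

-- Pre_ excludes the inputs on which A raises AssertionError (overlapping or negative indexes, a
-- running total exceeding a key, colliding reindexed keys) and the inputs where a key that is out
-- of numeric position in the dict's insertion order has a non-empty removal bucket — there A's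
-- running total follows insertion order instead of numeric order, an artefact of dict iteration
-- order, and A returns accidentally shifted indexes.
def Pre_adjust_stream_indexes_for_removals (indexed_map : List (Int × String)) (removed_indexes : List Int) : Prop :=
  (∀ k ∈ pvKeys indexed_map, k ∉ removed_indexes ∧ 0 ≤ k ∧ pvBelow removed_indexes k ≤ k) ∧
  (∀ r ∈ removed_indexes, 0 ≤ r) ∧
  (pvKeys indexed_map).Pairwise
    (fun a b => a - pvBelow removed_indexes a ≠ b - pvBelow removed_indexes b) ∧
  (pvKeys indexed_map).Pairwise
    (fun a b => b < a → pvBucket (pvKeys indexed_map) removed_indexes a = 0 ∧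
                        pvBucket (pvKeys indexed_map) removed_indexes b = 0)
instance (indexed_map : List (Int × String)) (removed_indexes : List Int) : Decidable (Pre_adjust_stream_indexes_for_removals indexed_map removed_indexes) := by unfold Pre_adjust_stream_indexes_for_removals; infer_instance

def pvWitness_adjust_stream_indexes_for_removals : (List (Int × String)) × List Int :=
  ([(0, "a"), (2, "b"), (5, "c")], [1, 3])

def Spec_adjust_stream_indexes_for_removals (indexed_map : List (Int × String)) (removed_indexes : List Int) (out : List (Int × String)) : Prop := out = adjust_stream_indexes_for_removals_alt indexed_map removed_indexes
instance (indexed_map : List (Int × String)) (removed_indexes : List Int) (out : List (Int × String)) : Decidable (Spec_adjust_stream_indexes_for_removals indexed_map removed_indexes out) := by unfold Spec_adjust_stream_indexes_for_removals; infer_instance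

-- ===== CLAIM (what is proved, stated in full; the proofs are below) =====
def Claim_equal_adjust_stream_indexes_for_removals : Prop := ∀ (indexed_map : List (Int × String)) (removed_indexes : List Int), Dom_adjust_stream_indexes_for_removals indexed_map removed_indexes → Pre_adjust_stream_indexes_for_removals indexed_map removed_indexes → Spec_adjust_stream_indexes_for_removals indexed_map removed_indexes (adjust_stream_indexes_for_removals indexed_map removed_indexes)

-- ===== LEMMAS AND PROOFS =====

-- pvAdvance: the meaning of the scan
theorem pvAdvance_lt_of_lt (S : List Int) (r : Int) (p : Nat) (j : Nat) (hj : j < S.length)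
    (hpj : p ≤ j) (hlt : j < pvAdvance S r p) : S[j] < r := by
  fun_induction pvAdvance S r p with
  | case1 p h hslt ih =>
    rcases Nat.eq_or_lt_of_le hpj with rfl | hplt
    · exact hslt
    · exact ih hplt hlt
  | case2 p h hslt => omega
  | case3 p h => omega
theorem pvAdvance_stop (S : List Int) (r : Int) (p : Nat)
    (h : pvAdvance S r p < S.length) : r ≤ S[pvAdvance S r p]'h := by
  fun_induction pvAdvance S r p with
  | case1 p hh hslt ih => exact ih h
  | case2 p hh hslt => omega
  | case3 p hh => omega
-- once done is set the fill loop is the identity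
theorem pvFill_done (S : List Int) (rs : List Int) (hist : PySem.Dict Int Int) (p : Nat) :
    rs.foldl (pvFillStep S) (hist, p, true) = (hist, p, true) := by
  induction rs with
  | nil => rfl
  | cons r rest ih => simpa [pvFillStep] using ih
-- the fill loop counts, in each bucket, the removed indexes whose first key ≥ r is that bucket
theorem pvFill_count (S : List Int) (rs : List Int) (hist : PySem.Dict Int Int) (p : Nat)
    (hrs : rs.Pairwise (fun a b => a ≤ b))
    (hinv : ∀ r ∈ rs, ∀ (j : Nat) (hj : j < S.length), j < p → S[j] < r) (k : Int) :
    ((rs.foldl (pvFillStep S) (hist, p, false)).1).getD k 0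
      = hist.getD k 0 + (rs.countP (fun r => S.find? (fun s => decide (r ≤ s)) = some k) : Int) := by
  induction rs generalizing hist p with
  | nil => simp
  | cons r rest ih =>
    rw [List.pairwise_cons] at hrs
    obtain ⟨hr_le, hrest⟩ := hrs
    have hinv_r := hinv r (by simp)
    by_cases h : pvAdvance S r p < S.length
    · have hstep : pvFillStep S (hist, p, false) r
          = (hist.modify (S[pvAdvance S r p]'h) 0 (· + 1), pvAdvance S r p, false) := by
        simp [pvFillStep, h]
      have hfind : S.find? (fun s => decide (r ≤ s)) = some (S[pvAdvance S r p]'h) := by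
        rw [List.find?_eq_some_iff_getElem]
        refine ⟨by simpa using pvAdvance_stop S r p h, pvAdvance S r p, h, rfl, ?_⟩
        intro j hj
        simp only [Bool.not_eq_eq_eq_not, Bool.not_true, decide_eq_false_iff_not, not_le]
        by_cases hjp : j < p
        · exact hinv_r j (by omega) hjp
        · exact pvAdvance_lt_of_lt S r p j (by omega) (by omega) hj
      have hinv' : ∀ r' ∈ rest, ∀ (j : Nat) (hj : j < S.length), j < pvAdvance S r p → S[j] < r' := by
        intro r' hr' j hj hjp
        have hrr' : r ≤ r' := hr_le r' hr'
        by_cases hjpp : j < p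
        · exact hinv r' (by simp [hr']) j hj hjpp
        · exact lt_of_lt_of_le (pvAdvance_lt_of_lt S r p j hj (by omega) hjp) hrr'
      rw [List.foldl_cons, hstep, ih _ _ hrest hinv']
      rw [List.countP_cons]
      rw [PySem.Dict.getD_modify]
      by_cases hk : k = S[pvAdvance S r p]'h
      · simp [hk, hfind]; ring
      · have : (S.find? (fun s => decide (r ≤ s)) = some k) = False := by
          simp [hfind]; intro hkk; exact hk hkk.symm
        simp [hk, this]
    · have hstep : pvFillStep S (hist, p, false) r = (hist, pvAdvance S r p, true) := by
        simp [pvFillStep, h]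
      have hall : ∀ r'' ∈ r :: rest, ∀ (j : Nat) (hj : j < S.length), S[j] < r'' := by
        intro r'' hr'' j hj
        have hrr : r ≤ r'' := by
          rcases hr'' with _ | hmem
          · exact le_refl r
          · exact hr_le r'' (by assumption)
        by_cases hjp : j < p
        · exact hinv r'' hr'' j hj hjp
        · exact lt_of_lt_of_le (pvAdvance_lt_of_lt S r p j hj (by omega) (by omega)) hrr
      rw [List.foldl_cons, hstep, pvFill_done]
      have hcnt : (r :: rest).countP (fun r => S.find? (fun s => decide (r ≤ s)) = some k) = 0 := by
        rw [List.countP_eq_zero]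
        intro r'' hr''
        simp only [decide_eq_true_eq]
        intro hfind
        rw [List.find?_eq_some_iff_getElem] at hfind
        obtain ⟨hpk, i, hi, hik, _⟩ := hfind
        have := hall r'' hr'' i hi
        rw [hik] at this
        simp at hpk
        omega
      simp [hcnt]
-- find? on the sorted key list = the closed-form bucket predicate of Pre_
theorem pvFind_bucket (S : List Int) (hS : S.Pairwise (· < ·)) (r k : Int) :
    (S.find? (fun s => decide (r ≤ s)) = some k)
      ↔ (k ∈ S ∧ r ≤ k ∧ ∀ k' ∈ S, ¬(r ≤ k' ∧ k' < k)) := by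
  rw [List.pairwise_iff_getElem] at hS
  constructor
  · intro hfind
    rw [List.find?_eq_some_iff_getElem] at hfind
    obtain ⟨hpk, i, hi, hik, hbefore⟩ := hfind
    subst hik
    refine ⟨List.getElem_mem hi, by simpa using hpk, ?_⟩
    intro k' hk' ⟨hrk', hk'k⟩
    obtain ⟨j, hj, hjk'⟩ := List.mem_iff_getElem.mp hk'
    subst hjk'
    rcases lt_trichotomy j i with hji | hji | hji
    · have := hbefore j hji; simp at this; omega
    · subst hji; omega
    · have := hS i j hi hj hji; omega
  · rintro ⟨hkS, hrk, hmin⟩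
    have hsome : (S.find? (fun s => decide (r ≤ s))).isSome = true := by
      rw [List.find?_isSome]; exact ⟨k, hkS, by simpa using hrk⟩
    obtain ⟨b, hb⟩ := Option.isSome_iff_exists.mp hsome
    have hbprops := hb
    rw [List.find?_eq_some_iff_getElem] at hbprops
    obtain ⟨hpb, i, hi, hib, hbefore⟩ := hbprops
    have hbS : b ∈ S := by subst hib; exact List.getElem_mem hi
    have hrb : r ≤ b := by simpa using hpb
    -- b = k
    have h1 : ¬ b < k := fun hlt => hmin b hbS ⟨hrb, hlt⟩
    have h2 : ¬ k < b := by
      intro hlt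
      obtain ⟨j, hj, hjk⟩ := List.mem_iff_getElem.mp hkS
      have hji : j < i := by
        rcases lt_trichotomy j i with h' | h' | h'
        · exact h'
        · exfalso; subst h'; omega
        · exfalso; have := hS i j hi hj h'; omega
      have := hbefore j hji
      rw [hjk] at this; simp at this; omega
    have : b = k := by omega
    rw [this] at hb; exact hb
-- double counting: sum over keys of counts over removed = sum over removed of counts over keys
theorem pvSwap (ks rs : List Int) (q : Int → Int → Bool) :
    (ks.map (fun k => (rs.countP (q k) : Int))).sum
      = (rs.map (fun r => (ks.countP (fun k => q k r) : Int))).sum := by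
  induction ks with
  | nil => simp
  | cons k ks ih =>
    simp only [List.map_cons, List.sum_cons, ih]
    have : (rs.map (fun r => ((ks.countP (fun k' => q k' r) : Int) + if q k r then 1 else 0))).sum
        = (rs.map (fun r => (ks.countP (fun k' => q k' r) : Int))).sum
          + (rs.map (fun r => if q k r = true then (1:Int) else 0)).sum :=
      PySem.List.sum_map_add_int rs _ _
    rw [PySem.List.sum_map_ite_one_zero] at this
    have hcongr : (rs.map (fun r => ((k :: ks).countP (fun k' => q k' r) : Int))).sum
        = (rs.map (fun r => ((ks.countP (fun k' => q k' r) : Int) + if q k r then 1 else 0))).sum := by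
      congr 1
      apply List.map_congr_left
      intro r _
      rw [List.countP_cons]
      split <;> push_cast <;> ring
    rw [hcongr, this]; ring
-- dropping zero terms of a sum
theorem pvSum_filter (l : List Int) (h : Int → Int) (p : Int → Bool)
    (hz : ∀ x ∈ l, p x = false → h x = 0) :
    (l.map h).sum = ((l.filter p).map h).sum := by
  induction l with
  | nil => rfl
  | cons x l ih =>
    have ih := ih (fun y hy => hz y (by simp [hy]))
    by_cases hp : p x
    · simp [hp, ih]
    · simp [hp, ih, hz x (by simp) (by simpa using hp)]
-- partition of the removed indexes below k0 into the buckets of the keys ≤ k0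
theorem pvPartition (K removed : List Int) (hK : K.Nodup)
    (hdisj : ∀ k ∈ K, k ∉ removed) (k0 : Int) (hk0 : k0 ∈ K) :
    (((K.filter (fun k => decide (k ≤ k0))).map (pvBucket K removed)).sum)
      = pvBelow removed k0 := by
  set S := PySem.List.sorted K (fun x => x) false with hSdef
  have hperm : S.Perm K := PySem.List.sorted_perm K (fun x => x) false
  have hSnodup : S.Nodup := (hperm.nodup_iff).mpr hK
  have hSle : S.Pairwise (fun a b => a ≤ b) := PySem.List.sorted_pairwise K (fun x => x)
  have hS : S.Pairwise (· < ·) :=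
    (hSle.and hSnodup).imp (fun h => lt_of_le_of_ne h.1 h.2)
  have hmemS : ∀ x : Int, x ∈ S ↔ x ∈ K := fun x => hperm.mem_iff
  set bp : Int → Int → Bool :=
    fun k r => decide (r ≤ k) && !(K.any (fun k' => decide (r ≤ k') && decide (k' < k))) with hbpdef
  have hbp_iff : ∀ k r, bp k r = true ↔ (r ≤ k ∧ ∀ k' ∈ K, ¬(r ≤ k' ∧ k' < k)) := by
    intro k r
    simp [hbpdef, not_and]
  have hbp_find : ∀ k r, k ∈ K → (bp k r = true ↔ S.find? (fun s => decide (r ≤ s)) = some k) := by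
    intro k r hkK
    rw [hbp_iff, pvFind_bucket S hS r k]
    constructor
    · rintro ⟨h1, h2⟩
      exact ⟨(hmemS k).mpr hkK, h1, fun k' hk' => h2 k' ((hmemS k').mp hk')⟩
    · rintro ⟨_, h1, h2⟩
      exact ⟨h1, fun k' hk' => h2 k' ((hmemS k').mpr hk')⟩
  have hunf : (K.filter (fun k => decide (k ≤ k0))).map (pvBucket K removed)
      = (K.filter (fun k => decide (k ≤ k0))).map (fun k => ((removed.countP (bp k)) : Int)) := by
    apply List.map_congr_left; intro k _; rfl
  rw [hunf, pvSwap]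
  have hinner : ∀ r ∈ removed,
      (((K.filter (fun k => decide (k ≤ k0))).countP (fun k => bp k r)) : Int)
        = if decide (r < k0) = true then (1 : Int) else 0 := by
    intro r hr
    have hrK : r ∉ K := fun hrk => hdisj r hrk hr
    rw [List.countP_filter]
    cases hfind : S.find? (fun s => decide (r ≤ s)) with
    | none =>
      have hcnt : K.countP (fun k => bp k r && decide (k ≤ k0)) = 0 := by
        rw [List.countP_eq_zero]
        intro k hkK hbpk
        rw [Bool.and_eq_true] at hbpk
        rw [hbp_find k r hkK] at hbpk
        rw [hfind] at hbpk
        simpa using hbpk.1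
      have hnlt : ¬ r < k0 := by
        intro hlt
        have : (S.find? (fun s => decide (r ≤ s))).isSome = true := by
          rw [List.find?_isSome]
          exact ⟨k0, (hmemS k0).mpr hk0, by simpa using le_of_lt hlt⟩
        rw [hfind] at this; simp at this
      simp [hcnt, hnlt]
    | some b =>
      obtain ⟨hbS, hrb, hbmin⟩ := (pvFind_bucket S hS r b).mp hfind
      have hbK : b ∈ K := (hmemS b).mp hbS
      have hbpk : ∀ k ∈ K, (bp k r = true ↔ k = b) := by
        intro k hkK
        rw [hbp_find k r hkK, hfind]
        constructor
        · intro h; exact (Option.some_inj.mp h).symm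
        · intro h; rw [h]
      by_cases hb0 : b ≤ k0
      · have hcnt : K.countP (fun k => bp k r && decide (k ≤ k0)) = 1 := by
          have : K.countP (fun k => bp k r && decide (k ≤ k0)) = K.countP (fun k => k == b) := by
            apply List.countP_congr
            intro k hkK
            by_cases hkb : k = b
            · subst hkb
              simp [(hbpk k hkK).mpr rfl, hb0]
            · simp [hkb]
              intro hbp; exact absurd ((hbpk k hkK).mp hbp) hkb
          rw [this]
          exact List.count_eq_one_of_mem hK hbK
        have hlt : r < k0 := by
          have hne : r ≠ k0 := fun he => hrK (he ▸ hk0)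
          omega
        simp [hcnt, hlt]
      · have hcnt : K.countP (fun k => bp k r && decide (k ≤ k0)) = 0 := by
          rw [List.countP_eq_zero]
          intro k hkK hbpk2
          rw [Bool.and_eq_true] at hbpk2
          have := (hbpk k hkK).mp hbpk2.1
          subst this
          exact hb0 (by simpa using hbpk2.2)
        have hnlt : ¬ r < k0 := by
          intro hlt
          exact hb0 (not_lt.mp (fun hk0b =>
            hbmin k0 ((hmemS k0).mpr hk0) ⟨le_of_lt hlt, hk0b⟩))
        simp [hcnt, hnlt]
  calc (removed.map (fun r => ((K.filter (fun k => decide (k ≤ k0))).countP (fun k => bp k r) : Int))).sum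
      = (removed.map (fun r => if decide (r < k0) = true then (1 : Int) else 0)).sum := by
        apply congrArg; exact List.map_congr_left hinner
    _ = ((removed.countP (fun r => decide (r < k0))) : Int) :=
        PySem.List.sum_map_ite_one_zero (fun r => decide (r < k0)) removed
    _ = pvBelow removed k0 := rfl

-- under the no-misplaced-bucket condition, A's running total at key k1 is the count below k1
theorem pvPrefix (K removed : List Int) (hK : K.Nodup)
    (hdisj : ∀ k ∈ K, k ∉ removed)
    (hmis : K.Pairwise (fun a b => b < a → pvBucket K removed a = 0 ∧ pvBucket K removed b = 0))
    (pre post : List Int) (k1 : Int) (hsplit : K = pre ++ k1 :: post) :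
    ((pre ++ [k1]).map (pvBucket K removed)).sum = pvBelow removed k1 := by
  have hk1 : k1 ∈ K := by rw [hsplit]; simp
  have hmis2 := hmis
  rw [hsplit] at hmis2
  obtain ⟨hpre, hcons, hbetween⟩ := List.pairwise_append.mp hmis2
  rw [List.pairwise_cons] at hcons
  have hKnodup := hK
  rw [hsplit] at hKnodup
  have hk1post : k1 ∉ post := by
    have := List.Nodup.of_append_right hKnodup
    rw [List.nodup_cons] at this
    exact this.1
  have hzero_pre : ∀ a ∈ pre, ¬ a ≤ k1 → pvBucket K removed a = 0 := by
    intro a ha hnot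
    rw [hsplit]
    exact (hbetween a ha k1 (by simp) (by omega)).1
  have hzero_post : ∀ b ∈ post, b ≤ k1 → pvBucket K removed b = 0 := by
    intro b hb hble
    have hne : b ≠ k1 := fun he => hk1post (he ▸ hb)
    rw [hsplit]
    exact (hcons.1 b hb (by omega)).2
  rw [pvSum_filter (pre ++ [k1]) (pvBucket K removed) (fun x => decide (x ≤ k1)) ?hz]
  case hz =>
    intro x hx hfx
    simp only [decide_eq_false_iff_not] at hfx
    rcases List.mem_append.mp hx with hxp | hxk
    · exact hzero_pre x hxp hfx
    · exfalso; simp at hxk; omega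
  rw [← pvPartition K removed hK hdisj k1 hk1]
  have e1 : (pre ++ [k1]).filter (fun x => decide (x ≤ k1))
      = pre.filter (fun x => decide (x ≤ k1)) ++ [k1] := by
    rw [List.filter_append]; simp
  have e2 : K.filter (fun x => decide (x ≤ k1))
      = pre.filter (fun x => decide (x ≤ k1)) ++ k1 :: post.filter (fun x => decide (x ≤ k1)) := by
    rw [hsplit, List.filter_append, List.filter_cons]; simp
  rw [e1, e2]
  simp only [List.map_append, List.sum_append, List.map_cons, List.sum_cons, List.map_nil,
    List.sum_nil]
  have e3 : ((post.filter (fun x => decide (x ≤ k1))).map (pvBucket K removed)).sum = 0 := by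
    apply List.sum_eq_zero
    intro x hx
    rw [List.mem_map] at hx
    obtain ⟨b, hb, rfl⟩ := hx
    rw [List.mem_filter] at hb
    exact hzero_post b hb.1 (by simpa using hb.2)
  rw [e3]

-- bisect_left on the sorted copy = count of removed indexes below k
theorem pvBisect (removed : List Int) (k : Int) :
    (PySem.List.bisectLeft (PySem.List.sorted removed (fun r => r) false) k : Int)
      = pvBelow removed k := by
  set rs := PySem.List.sorted removed (fun r => r) false with hrs
  have hsorted : rs.Pairwise (fun a b => a ≤ b) := PySem.List.sorted_pairwise removed (fun r => r)
  obtain ⟨hle, hlt, hge⟩ := PySem.List.bisectLeft_spec rs k hsorted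
  set b := PySem.List.bisectLeft rs k with hb
  have hperm : rs.Perm removed := PySem.List.sorted_perm removed (fun r => r) false
  unfold pvBelow
  rw [← hperm.countP_eq]
  have : rs.countP (fun r => decide (r < k)) = b := by
    conv_lhs => rw [← List.take_append_drop b rs]
    rw [List.countP_append]
    have h1 : (rs.take b).countP (fun r => decide (r < k)) = b := by
      have hlen : (rs.take b).length = b := by simp; omega
      have hall : (rs.take b).countP (fun r => decide (r < k)) = (rs.take b).length := by
        rw [List.countP_eq_length]
        intro a ha
        rw [List.mem_take_iff_getElem] at ha
        obtain ⟨j, hj, hja⟩ := ha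
        subst hja
        simp only [decide_eq_true_eq]
        exact hlt j (by omega) (by omega)
      omega
    have h2 : (rs.drop b).countP (fun r => decide (r < k)) = 0 := by
      rw [List.countP_eq_zero]
      intro a ha
      rw [List.mem_drop_iff_getElem] at ha
      obtain ⟨j, hj, hja⟩ := ha
      subst hja
      simp only [decide_eq_true_eq, not_lt]
      exact hge (b + j) (by omega) (by omega)
    omega
  rw [this]
-- the final histogram read off at a key ∈ K
theorem pvHist_getD (indexed_map : List (Int × String)) (removed : List Int)
    (k : Int) (hk : k ∈ pvKeys indexed_map) :
    (((PySem.List.sorted removed (fun r => r) false).foldl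
        (pvFillStep (PySem.List.sorted (pvKeys indexed_map) (fun x => x) false))
        ((PySem.List.sorted (pvKeys indexed_map) (fun x => x) false).foldl
            (fun h k => h.insert k 0) PySem.Dict.empty, 0, false)).1).getD k 0
      = pvBucket (pvKeys indexed_map) removed k := by
  set K := pvKeys indexed_map with hKdef
  have hK : K.Nodup := PySem.Dict.nodup_keys_ofList indexed_map
  set S := PySem.List.sorted K (fun x => x) false with hSdef
  have hperm : S.Perm K := PySem.List.sorted_perm K (fun x => x) false
  have hSnodup : S.Nodup := (hperm.nodup_iff).mpr hK
  have hSle : S.Pairwise (fun a b => a ≤ b) := PySem.List.sorted_pairwise K (fun x => x)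
  have hS : S.Pairwise (· < ·) :=
    (hSle.and hSnodup).imp (fun h => lt_of_le_of_ne h.1 h.2)
  have hmemS : ∀ x : Int, x ∈ S ↔ x ∈ K := fun x => hperm.mem_iff
  have hkS : k ∈ S := (hmemS k).mpr hk
  set hist0 : PySem.Dict Int Int := S.foldl (fun h k => h.insert k 0) PySem.Dict.empty with hh0
  have hitems0 : hist0.items = S.map (fun k => (k, (0 : Int))) := by
    rw [hh0]
    have := PySem.Dict.items_foldl_insert_fresh S (fun k => k) (fun _ => (0 : Int))
      (PySem.Dict.empty : PySem.Dict Int Int) (by intro a _; simp) (by simpa using hSnodup)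
    simpa using this
  have h0 : hist0.getD k 0 = 0 := by
    apply PySem.Dict.getD_of_mem_items
    · rw [hitems0, List.mem_map]; exact ⟨k, hkS, rfl⟩
    · show (hist0.items.map Prod.fst).Nodup
      rw [hitems0, List.map_map]
      have hcomp : (Prod.fst ∘ fun k : Int => (k, (0 : Int))) = id := rfl
      rw [hcomp, List.map_id]
      exact hSnodup
  rw [pvFill_count S (PySem.List.sorted removed (fun r => r) false) hist0 0
    (PySem.List.sorted_pairwise removed (fun r => r)) (by intro r _ j _ hj; omega) k]
  rw [h0, zero_add]
  rw [(PySem.List.sorted_perm removed (fun r => r) false).countP_eq]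
  show ((removed.countP fun r => decide (S.find? (fun s => decide (r ≤ s)) = some k)) : Int) = _
  unfold pvBucket
  congr 1
  apply List.countP_congr
  intro r _
  have hiff : (S.find? (fun s => decide (r ≤ s)) = some k)
      ↔ (r ≤ k ∧ ∀ k' ∈ K, ¬(r ≤ k' ∧ k' < k)) := by
    rw [pvFind_bucket S hS r k]
    constructor
    · rintro ⟨_, h1, h2⟩
      exact ⟨h1, fun k' hk' => h2 k' ((hmemS k').mpr hk')⟩
    · rintro ⟨h1, h2⟩
      exact ⟨hkS, h1, fun k' hk' => h2 k' ((hmemS k').mp hk')⟩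
  simp only [decide_eq_true_eq, Bool.and_eq_true, Bool.not_eq_eq_eq_not, Bool.not_true,
    List.any_eq_false, hiff, not_and]

-- A's second loop, with the histogram lookups abstracted into h
def pvAnn (h : Int → Int) : List (Int × String) → Int → List (Int × String)
  | [], _ => []
  | kv :: tl, rt => (kv.1 - (rt + h kv.1), kv.2) :: pvAnn h tl (rt + h kv.1)

theorem pvLoopA (h : Int → Int) (l : List (Int × String))
    (acc : PySem.Dict Int String) (rt : Int) :
    (l.foldl (fun (acc : PySem.Dict Int String × Int) kv =>
        (acc.1.insert (kv.1 - (acc.2 + h kv.1)) kv.2, acc.2 + h kv.1)) (acc, rt)).1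
      = (pvAnn h l rt).foldl (fun acc kv => acc.insert kv.1 kv.2) acc := by
  induction l generalizing acc rt with
  | nil => rfl
  | cons kv tl ih => simpa [pvAnn] using ih (acc.insert (kv.1 - (rt + h kv.1)) kv.2) (rt + h kv.1)

-- A's running totals along insertion order, rewritten entry by entry into B's per-key counts
theorem pvAnn_map (K removed : List Int) (hK : K.Nodup)
    (hdisj : ∀ k ∈ K, k ∉ removed)
    (hmis : K.Pairwise (fun a b => b < a → pvBucket K removed a = 0 ∧ pvBucket K removed b = 0))
    (h : Int → Int) (hh : ∀ k ∈ K, h k = pvBucket K removed k) :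
    ∀ (l pref : List (Int × String)), K = (pref ++ l).map Prod.fst →
      pvAnn h l ((pref.map (fun kv => h kv.1)).sum)
        = l.map (fun kv => (kv.1 - pvBelow removed kv.1, kv.2)) := by
  intro l
  induction l with
  | nil => intro pref _; rfl
  | cons kv tl ih =>
    intro pref hsplit
    have hkey : K = pref.map Prod.fst ++ kv.1 :: tl.map Prod.fst := by
      rw [hsplit]; simp
    have hmem_pref : ∀ p ∈ pref, p.1 ∈ K := by
      intro p hp; rw [hkey]; simp only [List.mem_append, List.mem_cons, List.mem_map]
      exact Or.inl ⟨p, hp, rfl⟩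
    have hkv1 : kv.1 ∈ K := by rw [hkey]; simp
    have hpref1 : (pref.map (fun kv => h kv.1)).sum + h kv.1 = pvBelow removed kv.1 := by
      have hpp := pvPrefix K removed hK hdisj hmis
        (pref.map Prod.fst) (tl.map Prod.fst) kv.1 hkey
      rw [List.map_append, List.sum_append] at hpp
      simp only [List.map_cons, List.map_nil, List.sum_cons, List.sum_nil, add_zero,
        List.map_map] at hpp
      rw [← hpp]
      congr 1
      · apply congrArg
        apply List.map_congr_left
        intro p hp
        exact hh p.1 (hmem_pref p hp)
      · exact hh kv.1 hkv1
    have htl := ih (pref ++ [kv]) (by rw [hsplit]; simp)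
    rw [List.map_append, List.sum_append] at htl
    simp only [List.map_cons, List.map_nil, List.sum_cons, List.sum_nil, add_zero] at htl
    simp only [pvAnn, List.map_cons]
    rw [htl, hpref1]

-- ===== VERDICT (by name: the statement is the Claim_ definition above) =====
theorem adjust_stream_indexes_for_removals_spec : Claim_equal_adjust_stream_indexes_for_removals := by
  intro m removed _hdom hpre
  unfold Spec_adjust_stream_indexes_for_removals
  obtain ⟨hkc, _hrneg, hinj, hmis⟩ := hpre
  have hK : (pvKeys m).Nodup := PySem.Dict.nodup_keys_ofList m
  have hdisj : ∀ k ∈ pvKeys m, k ∉ removed := fun k hk => (hkc k hk).1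
  have hg : ((pvKeys m).map (fun k : Int => k - pvBelow removed k)).Pairwise (· ≠ ·) :=
    List.pairwise_map.mpr hinj
  have hkeynodup : ((PySem.Dict.ofList m).items.map
      (fun kv : Int × String => kv.1 - pvBelow removed kv.1)).Nodup := by
    have he : (fun kv : Int × String => kv.1 - pvBelow removed kv.1)
        = (fun k : Int => k - pvBelow removed k) ∘ Prod.fst := rfl
    rw [he, ← List.map_map]
    exact hg
  have hmapnodup : (((PySem.Dict.ofList m).items.map
      (fun kv => (kv.1 - pvBelow removed kv.1, kv.2))).map Prod.fst).Nodup := by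
    rw [List.map_map]
    exact hkeynodup
  have hB : adjust_stream_indexes_for_removals_alt m removed
      = (PySem.Dict.ofList m).items.map (fun kv => (kv.1 - pvBelow removed kv.1, kv.2)) := by
    simp only [adjust_stream_indexes_for_removals_alt]
    simp only [pvBisect]
    rw [PySem.Dict.items_foldl_insert_fresh ((PySem.Dict.ofList m).items)
      (fun kv => kv.1 - pvBelow removed kv.1) (fun kv => kv.2) PySem.Dict.empty
      (by intro a _; simp) hkeynodup]
    simp [PySem.Dict.empty]
  rw [hB]
  by_cases hsz : (PySem.Dict.ofList m).size = 0
  · have hnil : (PySem.Dict.ofList m).items = [] := List.length_eq_zero_iff.mp hsz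
    simp [adjust_stream_indexes_for_removals, hsz, hnil]
  · simp only [adjust_stream_indexes_for_removals, if_neg hsz]
    set hist := ((PySem.List.sorted removed (fun r => r) false).foldl
        (pvFillStep (PySem.List.sorted (PySem.Dict.ofList m).keys (fun k => k) false))
        ((PySem.List.sorted (PySem.Dict.ofList m).keys (fun k => k) false).foldl
            (fun h k => h.insert k 0) PySem.Dict.empty, 0, false)).1 with hhist
    rw [pvLoopA (fun k => hist.getD k 0) (PySem.Dict.ofList m).items PySem.Dict.empty 0]
    have hann := pvAnn_map (pvKeys m) removed hK hdisj hmis (fun k => hist.getD k 0)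
        (fun k hk => by rw [hhist]; exact pvHist_getD m removed k hk)
        (PySem.Dict.ofList m).items [] rfl
    simp only [List.map_nil, List.sum_nil] at hann
    rw [hann]
    rw [PySem.Dict.items_foldl_insert_fresh _ Prod.fst Prod.snd PySem.Dict.empty
      (by intro a _; simp) hmapnodup]
    simp [PySem.Dict.empty]
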